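-- pv_equiv track=rewrite | github.com/tzerecords/lead-enrichment-engine | src/validators/email_validator.py | _is_generic_email
-- ===== SOURCE A (Python) =====
-- GENERIC_LOCAL_PARTS = {
--     "info",
--     "contact",
--     "contacto",
--     "admin",
--     "administrator",
--     "noreply",
--     "no-reply",
--     "support",
--     "soporte",
--     "help",
--     "ayuda",
--     "ventas",
--     "comercial",
--     "sales",
--     "marketing",
--     "webmaster",
--     "postmaster",
--     "abuse",
--     "privacy",
--     "legal",
-- }
--
-- def _is_generic_email(email: str) -> bool:
--     """Check if email is generic (info@, contact@, etc.).
--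
--     Args:
--         email: Email address to check.
--
--     Returns:
--         True if email is generic, False otherwise.
--     """
--     if not email or "@" not in email:
--         return True
--
--     local_part = email.split("@")[0].lower().strip()
--
--     # Check exact match
--     if local_part in GENERIC_LOCAL_PARTS:
--         return True
--
--     # Check if starts with generic prefix (e.g., "info2", "contacto1")
--     for generic in GENERIC_LOCAL_PARTS:
--         if local_part.startswith(generic) and (
--             local_part == generic or local_part[len(generic) :].isdigit()
--         ):
--             return True
--
--     return False
-- ===== SOURCE B (Python) =====
-- GENERIC_LOCAL_PARTS = {
--     "info",
--     "contact",
--     "contacto",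
--     "admin",
--     "administrator",
--     "noreply",
--     "no-reply",
--     "support",
--     "soporte",
--     "help",
--     "ayuda",
--     "ventas",
--     "comercial",
--     "sales",
--     "marketing",
--     "webmaster",
--     "postmaster",
--     "abuse",
--     "privacy",
--     "legal",
-- }
--
--
-- def _is_generic_email(email: str) -> bool:
--     """Check if email is generic (info@, contact@, etc.)."""
--     if not email or "@" not in email:
--         return True
--
--     local_part = email.split("@")[0].lower().strip()
--
--     # Strip the maximal trailing run of digit characters, then do one lookup:
--     # every generic local-part ends in a non-digit, so "info2" normalizes to "info".
--     i = len(local_part)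
--     while i > 0 and local_part[i - 1].isdigit():
--         i -= 1
--
--     return local_part[:i] in GENERIC_LOCAL_PARTS
-- ===== Notes on version B (the rewrite author's own statement) =====
-- stated objective: simpler
-- what changed: Instead of scanning all 20 generic local-parts testing startswith plus an all-digit suffix for each, B strips the maximal trailing digit run from the local-part once and does a single set membership lookup.
import Mathlib
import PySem

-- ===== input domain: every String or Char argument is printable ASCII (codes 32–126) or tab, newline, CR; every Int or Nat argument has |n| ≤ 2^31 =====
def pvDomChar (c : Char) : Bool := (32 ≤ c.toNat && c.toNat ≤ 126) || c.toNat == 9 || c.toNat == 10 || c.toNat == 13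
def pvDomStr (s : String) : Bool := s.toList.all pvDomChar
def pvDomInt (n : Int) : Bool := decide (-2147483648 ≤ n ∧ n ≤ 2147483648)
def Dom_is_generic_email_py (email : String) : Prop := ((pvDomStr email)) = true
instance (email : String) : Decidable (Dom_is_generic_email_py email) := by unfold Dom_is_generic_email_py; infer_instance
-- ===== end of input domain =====

-- B replaces A's scan over all 20 generic prefixes (startswith + digit-suffix test each) by
-- stripping the maximal trailing digit run once and doing a single set lookup (objective: simpler).

-- ===== PORT A =====
def GENERIC_LOCAL_PARTS : PySem.Set String := PySem.Set.ofList
  ["info", "contact", "contacto", "admin", "administrator", "noreply", "no-reply",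
   "support", "soporte", "help", "ayuda", "ventas", "comercial", "sales", "marketing",
   "webmaster", "postmaster", "abuse", "privacy", "legal"]

def is_generic_email_py (email : String) : Bool :=
  if email == "" || !(PySem.Str.isIn "@" email) then true
  else
    let local_part := PySem.Str.strip (PySem.Str.lower (((PySem.Str.split? email "@").getD []).headD ""))
    -- exact match
    if PySem.Set.contains GENERIC_LOCAL_PARTS local_part then true
    -- the for-loop over the set: any-semantics is order-independent, so folding the list is exact
    else if GENERIC_LOCAL_PARTS.any (fun generic =>
        PySem.Str.startswith local_part generic &&
          (local_part == generic ||
            PySem.Str.strIsdigit (PySem.Str.slice local_part (some (PySem.Str.len generic)) none)))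
      then true
    else false

-- ===== PORT B =====
def is_generic_email_py_alt (email : String) : Bool :=
  if email == "" || !(PySem.Str.isIn "@" email) then true
  else
    let local_part := PySem.Str.strip (PySem.Str.lower (((PySem.Str.split? email "@").getD []).headD ""))
    -- the backward index loop `while i > 0 and local_part[i-1].isdigit(): i -= 1; local_part[:i]`
    -- walks off the trailing digit characters: dropWhile isdigit on the reversed character list
    let prfx := String.ofList (List.dropWhile PySem.Chars.isdigit local_part.toList.reverse).reverse
    PySem.Set.contains GENERIC_LOCAL_PARTS prfx

-- ===== PRECONDITION & SPEC =====
def Spec_is_generic_email_py (email : String) (out : Bool) : Prop := out = is_generic_email_py_alt email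
instance (email : String) (out : Bool) : Decidable (Spec_is_generic_email_py email out) := by unfold Spec_is_generic_email_py; infer_instance

-- ===== CLAIM (what is proved, stated in full; the proofs are below) =====
def Claim_equal_is_generic_email_py : Prop := ∀ (email : String), Dom_is_generic_email_py email → Spec_is_generic_email_py email (is_generic_email_py email)

-- ===== LEMMAS AND PROOFS =====

-- String == reduces to == on the character lists
theorem beq_toList_eq (a b : String) : (a == b) = (a.toList == b.toList) := by
  apply Bool.eq_iff_iff.mpr
  simp [String.toList_inj]

-- per-generic core fact, on character lists: `s` matches generic `g` (equal, or g plus a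
-- nonempty all-digit suffix) iff stripping s's trailing digit run yields g — provided g itself
-- ends in a non-digit (g is a fixed point of rdropWhile isdigit).
theorem per_g_chars (g s : List Char)
    (hg : List.rdropWhile PySem.Chars.isdigit g = g) :
    ((s == g) || (PySem.Chars.startswith s g &&
        ((s == g) || PySem.Chars.strIsdigit (s.drop g.length))))
      = (List.rdropWhile PySem.Chars.isdigit s == g) := by
  apply Bool.eq_iff_iff.mpr
  simp only [Bool.or_eq_true, Bool.and_eq_true, beq_iff_eq, PySem.Chars.startswith,
    List.isPrefixOf_iff_prefix, PySem.Chars.strIsdigit, List.isEmpty_eq_false_iff,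
    Bool.not_eq_eq_eq_not, Bool.not_true, List.all_eq_true]
  constructor
  · rintro (rfl | ⟨hpre, (rfl | ⟨hne, hall⟩)⟩)
    · exact hg
    · exact hg
    · obtain ⟨d, rfl⟩ := hpre
      rw [List.drop_left] at hne hall
      have hd : List.dropWhile PySem.Chars.isdigit d.reverse = [] := by
        rw [List.dropWhile_eq_nil_iff]
        intro x hx
        exact hall x (List.mem_reverse.mp hx)
      have : List.dropWhile PySem.Chars.isdigit g.reverse = g.reverse := by
        have := congrArg List.reverse hg
        simpa [List.rdropWhile] using this
      simp [List.rdropWhile, List.reverse_append, List.dropWhile_append, hd, this]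
  · intro h
    have hs : List.rdropWhile PySem.Chars.isdigit s ++ List.rtakeWhile PySem.Chars.isdigit s = s :=
      List.rdropWhile_append_rtakeWhile
    rw [h] at hs
    rcases hd : List.rtakeWhile PySem.Chars.isdigit s with _ | ⟨c, d⟩
    · left; rw [hd] at hs; simpa using hs.symm
    · right
      rw [hd] at hs
      refine ⟨⟨c :: d, hs⟩, ?_⟩
      right
      rw [← hs, List.drop_left]
      refine ⟨by simp, ?_⟩
      intro x hx
      exact List.mem_rtakeWhile_imp (by rw [hd]; exact hx)

-- the same fact, lifted to the String forms used by the ports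
theorem per_g_str (g lp : String)
    (hg : List.rdropWhile PySem.Chars.isdigit g.toList = g.toList) :
    ((lp == g) || (PySem.Str.startswith lp g &&
        ((lp == g) ||
          PySem.Str.strIsdigit (PySem.Str.slice lp (some (PySem.Str.len g)) none))))
      = ((String.ofList (List.dropWhile PySem.Chars.isdigit lp.toList.reverse).reverse) == g) := by
  have hslice : (PySem.Str.slice lp (some (PySem.Str.len g)) none).toList
      = lp.toList.drop g.toList.length := by
    rw [PySem.Str.toList_slice, PySem.Str.len_eq, PySem.Chars.slice,
      PySem.List.slice_from _ (by positivity)]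
    simp
  rw [beq_toList_eq lp g, beq_toList_eq _ g, String.toList_ofList,
    PySem.Str.startswith_eq, PySem.Str.strIsdigit_eq, hslice,
    show (List.dropWhile PySem.Chars.isdigit lp.toList.reverse).reverse
      = List.rdropWhile PySem.Chars.isdigit lp.toList from rfl]
  exact per_g_chars g.toList lp.toList hg

-- the whole membership-or-scan of A collapses, generic by generic, to B's single lookup
theorem scan_eq_lookup_core (G : List String)
    (hG : ∀ g ∈ G, List.rdropWhile PySem.Chars.isdigit g.toList = g.toList) (lp : String) :
    (G.contains lp || G.any (fun generic =>
        PySem.Str.startswith lp generic &&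
          (lp == generic ||
            PySem.Str.strIsdigit (PySem.Str.slice lp (some (PySem.Str.len generic)) none))))
      = G.contains (String.ofList (List.dropWhile PySem.Chars.isdigit lp.toList.reverse).reverse) := by
  induction G with
  | nil => simp
  | cons g G ih =>
    have hg := hG g (List.mem_cons_self ..)
    have iht := ih (fun x hx => hG x (List.mem_cons_of_mem _ hx))
    simp only [List.contains_cons, List.any_cons]
    rw [show ∀ a b c d : Bool, ((a || b) || (c || d)) = ((a || c) || (b || d)) from by decide,
      per_g_str g lp hg, iht]

-- A's two-step check (exact membership, else the prefix scan) equals B's single lookup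
theorem scan_eq_lookup (G : List String)
    (hG : ∀ g ∈ G, List.rdropWhile PySem.Chars.isdigit g.toList = g.toList) (lp : String) :
    (if PySem.Set.contains G lp then true
     else if G.any (fun generic =>
        PySem.Str.startswith lp generic &&
          (lp == generic ||
            PySem.Str.strIsdigit (PySem.Str.slice lp (some (PySem.Str.len generic)) none)))
       then true else false)
      = PySem.Set.contains G (String.ofList (List.dropWhile PySem.Chars.isdigit lp.toList.reverse).reverse) := by
  rw [show ∀ a b : Bool, (if a then true else if b then true else false) = (a || b) from by decide]
  exact scan_eq_lookup_core G hG lp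

-- ===== VERDICT (by name: the statement is the Claim_ definition above) =====
theorem is_generic_email_py_spec : Claim_equal_is_generic_email_py := by
  intro email _
  unfold Spec_is_generic_email_py is_generic_email_py is_generic_email_py_alt
  cases hguard : (email == "" || !(PySem.Str.isIn "@" email)) with
  | true => simp only [if_true]
  | false =>
    simp only [Bool.false_eq_true, if_false]
    exact scan_eq_lookup GENERIC_LOCAL_PARTS (by decide) _
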